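-- pv_equiv track=rewrite | github.com/fpfiel/symmetric_encryption | encryption.py | string_to_blocks
-- ===== SOURCE A (Python) =====
-- def string_to_blocks(input_string, block_size=12):
--     ascii_values = [ord(char) for char in input_string]
--
--     binary_values = [format(ascii_val, '08b') for ascii_val in ascii_values]
--
--     binary_string = ''.join(binary_values)
--
--     # when slicing in python with string[a:b] with b>len(string) python automatically cuts until the end of the string
--     blocks = [binary_string[i:i + block_size] for i in range(0, len(binary_string), block_size)]
--
--     if len(blocks) > 0 and len(blocks[-1]) < block_size:
--         #required_padding = block_size - len(blocks[-1])
--         blocks[-1] = blocks[-1].ljust(block_size, '0') # string.ljust(length, char) appends the char length-len(string) times so afterwards len(string) is equal to length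
--
--     return blocks
-- ===== SOURCE B (Python) =====
-- def string_to_blocks(input_string, block_size=12):
--     # Bit-arithmetic chunker: computes each output block directly from the bit
--     # index, without building the intermediate joined binary string.
--     n = 8 * len(input_string)
--     blocks = []
--     for start in range(0, n, block_size):
--         chars = []
--         for j in range(start, start + block_size):
--             if j < n:
--                 bit = (ord(input_string[j >> 3]) >> (7 - (j & 7))) & 1
--                 chars.append('1' if bit else '0')
--             else:
--                 chars.append('0')
--         blocks.append(''.join(chars))
--     return blocks
-- ===== Notes on version B (the rewrite author's own statement) =====
-- stated objective: alternative
-- what changed: Instead of formatting every char to an 8-bit string, joining them into one big binary string and slicing it, B computes each block character directly by bit arithmetic (shift/mask on the char code at the given bit index), emitting zero characters past the end; no intermediate joined string is built.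
import Mathlib
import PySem

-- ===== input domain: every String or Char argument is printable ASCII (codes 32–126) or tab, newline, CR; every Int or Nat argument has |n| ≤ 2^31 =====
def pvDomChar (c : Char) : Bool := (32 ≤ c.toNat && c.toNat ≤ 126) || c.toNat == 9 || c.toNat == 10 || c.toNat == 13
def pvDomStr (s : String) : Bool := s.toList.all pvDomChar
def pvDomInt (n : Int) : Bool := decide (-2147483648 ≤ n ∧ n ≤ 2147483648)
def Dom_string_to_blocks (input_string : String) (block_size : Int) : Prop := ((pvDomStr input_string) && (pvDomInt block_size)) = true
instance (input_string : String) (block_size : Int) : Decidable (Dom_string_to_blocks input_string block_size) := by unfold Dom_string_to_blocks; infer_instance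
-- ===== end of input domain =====

-- B replaces A's format/join/slice pipeline by direct bit arithmetic per output position
-- (alternative decomposition, same cost class).

-- ===== PORT A =====
-- Python str values are carried as List Char (PySem.Chars) and converted to String on return.
-- format(v, '08b') — exact for v ≥ 0 (the only use: v is an ord of an ASCII char).
def pvFmt08b (v : Int) : List Char := PySem.Chars.zfill (PySem.Int.toBinChars v) 8
-- cs.ljust(w, '0') — exact: Python pads on the right only when len(cs) < w.
def pvLjustZero (cs : List Char) (w : Int) : List Char := cs ++ List.replicate (w.toNat - cs.length) '0'

def string_to_blocks (input_string : String) (block_size : Int) : List String :=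
  let ascii_values : List Int := input_string.toList.map (fun c => (c.toNat : Int))
  let binary_values : List (List Char) := ascii_values.map (fun v => pvFmt08b v)
  let binary_string : List Char := PySem.Chars.join [] binary_values
  let blocks : List (List Char) :=
    (PySem.List.pyRange 0 (binary_string.length : Int) block_size).map
      (fun i => PySem.List.slice binary_string (some i) (some (i + block_size)))
  let blocks :=
    if 0 < blocks.length ∧ ((blocks.getLastD []).length : Int) < block_size then
      blocks.dropLast ++ [pvLjustZero (blocks.getLastD []) block_size]
    else blocks
  blocks.map (fun b => String.ofList b)

-- ===== PORT B =====
def string_to_blocks_alt (input_string : String) (block_size : Int) : List String :=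
  let n : Int := 8 * PySem.Str.len input_string
  (PySem.List.pyRange 0 n block_size).map (fun start =>
    String.ofList ((PySem.List.pyRange start (start + block_size) 1).map (fun j =>
      if j < n then
        if ((PySem.List.pyGetD input_string.toList (PySem.Int.floordiv j 8) ' ').toNat
              >>> (7 - (PySem.Int.mod j 8).toNat)) &&& 1 = 1
        then '1' else '0'
      else '0')))

-- ===== PRECONDITION & SPEC =====
-- Both Pythons raise ValueError for block_size = 0 (range() with step 0); that is all Pre_ excludes.
def Pre_string_to_blocks (input_string : String) (block_size : Int) : Prop := block_size ≠ 0
instance (input_string : String) (block_size : Int) : Decidable (Pre_string_to_blocks input_string block_size) := by unfold Pre_string_to_blocks; infer_instance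
def pvWitness_string_to_blocks : String × Int := ("ab", 3)

def Spec_string_to_blocks (input_string : String) (block_size : Int) (out : List String) : Prop := out = string_to_blocks_alt input_string block_size
instance (input_string : String) (block_size : Int) (out : List String) : Decidable (Spec_string_to_blocks input_string block_size out) := by unfold Spec_string_to_blocks; infer_instance

-- ===== CLAIM (what is proved, stated in full; the proofs are below) =====
def Claim_equal_string_to_blocks : Prop := ∀ (input_string : String) (block_size : Int), Dom_string_to_blocks input_string block_size → Pre_string_to_blocks input_string block_size → Spec_string_to_blocks input_string block_size (string_to_blocks input_string block_size)

-- ===== LEMMAS AND PROOFS =====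

-- format(v,'08b') for 0 ≤ v < 256: 8 characters, the k-th is bit (7-k) of v.
set_option maxRecDepth 4000 in
lemma pvFmt08b_table : ∀ v : Nat, v < 256 →
    (pvFmt08b (v : Int)).length = 8 ∧
    ∀ k : Nat, k < 8 → (pvFmt08b (v : Int)).getD k ' ' =
      (if (v >>> (7 - k)) &&& 1 = 1 then '1' else '0') := by decide

lemma join_nil_eq_flatten (ps : List (List Char)) : PySem.Chars.join [] ps = ps.flatten := by
  induction ps with
  | nil => simp [PySem.Chars.join_nil]
  | cons p rest ih =>
    cases rest with
    | nil => simp [PySem.Chars.join_singleton]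
    | cons q r => simp [PySem.Chars.join_cons_cons, ih]

lemma flatten_length_eq (ps : List (List Char)) (h : ∀ p ∈ ps, p.length = 8) :
    ps.flatten.length = 8 * ps.length := by
  induction ps with
  | nil => simp
  | cons p rest ih =>
    simp only [List.flatten_cons, List.length_append, List.length_cons]
    rw [h p (by simp), ih (fun q hq => h q (by simp [hq]))]
    ring

lemma flatten_getD (ps : List (List Char)) (h : ∀ p ∈ ps, p.length = 8) :
    ∀ j : Nat, j < 8 * ps.length →
      ps.flatten.getD j ' ' = (ps.getD (j / 8) []).getD (j % 8) ' ' := by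
  induction ps with
  | nil => intro j hj; simp at hj
  | cons p rest ih =>
    intro j hj
    have hp : p.length = 8 := h p (by simp)
    by_cases hj8 : j < 8
    · have : j / 8 = 0 := by omega
      rw [this]
      simp only [List.flatten_cons, List.getD_cons_zero]
      rw [List.getD_append _ _ _ _ (by omega)]
      congr 1
      omega
    · have hrec := ih (fun q hq => h q (by simp [hq])) (j - 8) (by simp at hj ⊢; omega)
      simp only [List.flatten_cons]
      rw [List.getD_eq_getElem?_getD, List.getElem?_append_right (by omega),
          ← List.getD_eq_getElem?_getD, hp, hrec]
      have h1 : j / 8 = (j - 8) / 8 + 1 := by omega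
      have h2 : j % 8 = (j - 8) % 8 := by omega
      rw [h1, h2, List.getD_cons_succ]

-- the joined binary string, as a function of the input characters
def pvBin (cs : List Char) : List Char := (cs.map (fun c => pvFmt08b (c.toNat : Int))).flatten

lemma pvBin_length (cs : List Char) (h : ∀ c ∈ cs, c.toNat < 256) :
    (pvBin cs).length = 8 * cs.length := by
  unfold pvBin
  rw [flatten_length_eq]
  · simp
  · intro p hp
    simp only [List.mem_map] at hp
    obtain ⟨c, hc, rfl⟩ := hp
    exact (pvFmt08b_table c.toNat (h c hc)).1

lemma pvBin_getD (cs : List Char) (h : ∀ c ∈ cs, c.toNat < 256) (j : Nat) (hj : j < 8 * cs.length) :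
    (pvBin cs).getD j ' ' =
      (if ((cs.getD (j / 8) ' ').toNat >>> (7 - j % 8)) &&& 1 = 1 then '1' else '0') := by
  unfold pvBin
  have hall : ∀ p ∈ cs.map (fun c => pvFmt08b (c.toNat : Int)), p.length = 8 := by
    intro p hp
    simp only [List.mem_map] at hp
    obtain ⟨c, hc, rfl⟩ := hp
    exact (pvFmt08b_table c.toNat (h c hc)).1
  rw [flatten_getD _ hall j (by simpa using hj)]
  have hd : j / 8 < cs.length := by omega
  have hc : cs.getD (j / 8) ' ' = cs[j / 8] := List.getD_eq_getElem cs ' ' hd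
  have hm : (cs.map (fun c => pvFmt08b (c.toNat : Int))).getD (j / 8) [] =
      pvFmt08b ((cs[j / 8]).toNat : Int) := by
    rw [List.getD_eq_getElem _ _ (by simpa using hd)]
    simp
  rw [hm, hc]
  exact (pvFmt08b_table (cs[j / 8]).toNat (h _ (by simp))).2 (j % 8) (by omega)

-- one block: A's padded slice = B's bit-computed block, for a block start 0 ≤ i < 8·len
lemma block_eq (cs : List Char) (h : ∀ c ∈ cs, c.toNat < 256) (bs : Int) (hbs : 0 < bs)
    (i : Int) (hi0 : 0 ≤ i) (hin : i < 8 * cs.length) :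
    pvLjustZero (PySem.List.slice (pvBin cs) (some i) (some (i + bs))) bs =
      (PySem.List.pyRange i (i + bs) 1).map (fun j =>
        if j < 8 * (cs.length : Int) then
          if ((PySem.List.pyGetD cs (PySem.Int.floordiv j 8) ' ').toNat
                >>> (7 - (PySem.Int.mod j 8).toNat)) &&& 1 = 1
          then '1' else '0'
        else '0') := by
  have hL : (pvBin cs).length = 8 * cs.length := pvBin_length cs h
  have hiN : i.toNat < 8 * cs.length := by omega
  rw [PySem.List.slice_toNat (pvBin cs) hi0 (by omega), PySem.List.pyRange_one]
  have hBt : ((i + bs).toNat - i.toNat) = bs.toNat := by omega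
  have hB2 : (i + bs - i).toNat = bs.toNat := by omega
  rw [hBt, hB2]
  unfold pvLjustZero
  apply List.ext_getElem
  · simp only [List.length_append, List.length_take, List.length_drop,
      List.length_replicate, List.length_map, List.length_range, hL]
    omega
  · intro t ht1 ht2
    simp only [List.length_append, List.length_take, List.length_drop,
      List.length_replicate, hL] at ht1
    have ht : t < bs.toNat := by omega
    simp only [List.getElem_map, List.getElem_range]
    by_cases hfull : t < min bs.toNat (8 * cs.length - i.toNat)
    · rw [List.getElem_append_left (by simp only [List.length_take, List.length_drop, hL]; omega)]
      rw [List.getElem_take, List.getElem_drop]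
      have hj : i.toNat + t < 8 * cs.length := by omega
      have hcond : i + (t : Int) < 8 * (cs.length : Nat) := by omega
      rw [if_pos hcond]
      have hcast : i + (t : Int) = ((i.toNat + t : Nat) : Int) := by omega
      have h8 : (8 : Int) = ((8 : Nat) : Int) := by norm_num
      rw [hcast, h8, PySem.Int.floordiv_natCast (i.toNat + t) 8, PySem.Int.mod_natCast,
        PySem.List.pyGetD_natCast, Int.toNat_natCast]
      have hv := pvBin_getD cs h (i.toNat + t) hj
      rw [List.getD_eq_getElem _ _ (by omega)] at hv
      exact hv
    · rw [List.getElem_append_right (by simp only [List.length_take, List.length_drop, hL]; omega)]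
      simp only [List.getElem_replicate]
      have : ¬ (i + (t : Int) < 8 * (cs.length : Nat)) := by omega
      rw [if_neg this]

lemma pvLjustZero_full (cs : List Char) (bs : Int) (h : bs.toNat ≤ cs.length) :
    pvLjustZero cs bs = cs := by
  unfold pvLjustZero
  rw [Nat.sub_eq_zero_of_le h]
  simp

-- A's "fix the last block in place" equals padding every block (earlier blocks are full).
lemma fixlast_map (K : Nat) (g : Nat → List Char) (bs : Int) (hbs : 0 < bs)
    (hfull : ∀ k, k + 1 < K → (g k).length = bs.toNat) :
    (if 0 < ((List.range K).map g).length ∧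
        (((((List.range K).map g).getLastD []).length : Int) < bs) then
      ((List.range K).map g).dropLast ++ [pvLjustZero (((List.range K).map g).getLastD []) bs]
    else (List.range K).map g) =
    (List.range K).map (fun k => pvLjustZero (g k) bs) := by
  cases K with
  | zero => simp
  | succ K' =>
    have hinit : (List.range K').map g = (List.range K').map (fun k => pvLjustZero (g k) bs) := by
      apply List.map_congr_left
      intro k hk
      rw [pvLjustZero_full _ _ (by rw [hfull k (by simp at hk; omega)])]
    rw [List.range_succ, List.map_append, List.map_append, List.map_singleton, List.map_singleton]
    rw [List.getLastD_concat, List.dropLast_concat]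
    by_cases hc : ((g K').length : Int) < bs
    · rw [if_pos ⟨by simp, hc⟩, hinit]
    · rw [if_neg (by simp only [not_and]; intro _; exact hc), hinit]
      congr 1
      rw [pvLjustZero_full _ _ (by omega)]

theorem main_eq : ∀ (s : String) (bs : Int), Dom_string_to_blocks s bs → bs ≠ 0 →
    string_to_blocks s bs = string_to_blocks_alt s bs := by
  intro s bs hDom hPre
  have hcodes : ∀ c ∈ s.toList, c.toNat < 256 := by
    intro c hc
    have h1 : pvDomStr s = true := by
      unfold Dom_string_to_blocks at hDom
      simp only [Bool.and_eq_true] at hDom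
      exact hDom.1
    unfold pvDomStr at h1
    rw [List.all_eq_true] at h1
    have := h1 c hc
    unfold pvDomChar at this
    simp only [Bool.or_eq_true, Bool.and_eq_true, decide_eq_true_eq, beq_iff_eq] at this
    omega
  unfold string_to_blocks string_to_blocks_alt
  have hbin : PySem.Chars.join []
      ((s.toList.map (fun c => ((c.toNat : Nat) : Int))).map (fun v => pvFmt08b v)) =
      pvBin s.toList := by
    rw [join_nil_eq_flatten, List.map_map]
    rfl
  simp only [hbin]
  have hlen : ((pvBin s.toList).length : Int) = 8 * PySem.Str.len s := by
    rw [pvBin_length s.toList hcodes]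
    simp [PySem.Str.len]
  rw [hlen]
  set N : Int := 8 * PySem.Str.len s with hN
  have hN0 : 0 ≤ N ∧ N = 8 * (s.toList.length : Int) := by
    constructor <;> simp [hN, PySem.Str.len]
  rcases lt_or_gt_of_ne hPre with hneg | hpos
  · -- negative step: the range is empty, both return []
    have hr : PySem.List.pyRange 0 N bs = [] := by
      unfold PySem.List.pyRange
      rw [if_neg hPre, if_neg (by omega), if_neg (by omega)]
      simp
    rw [hr]
    simp
  · -- positive step
    rw [PySem.List.pyRange_of_pos 0 N hpos]
    set K : Nat := (if (0:Int) < N then ((N - 0 + bs - 1) / bs).toNat else 0) with hK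
    have hKbound : ∀ k : Nat, k < K → bs * k < N := by
      intro k hk
      have h0N : (0:Int) < N := by
        by_contra hcon
        simp only [hK, if_neg hcon] at hk
        omega
      rw [hK, if_pos h0N] at hk
      have hk' : (k : Int) + 1 ≤ (N - 0 + bs - 1) / bs := by omega
      have := (Int.le_ediv_iff_mul_le hpos).mp hk'
      nlinarith
    rw [List.map_map, List.map_map]
    simp only [Function.comp_def]
    have hcore : ∀ k : Nat, k < K →
        pvLjustZero (PySem.List.slice (pvBin s.toList) (some (0 + bs * k)) (some (0 + bs * k + bs))) bs =
        (PySem.List.pyRange (0 + bs * k) (0 + bs * k + bs) 1).map (fun j =>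
          if j < N then
            if ((PySem.List.pyGetD s.toList (PySem.Int.floordiv j 8) ' ').toNat
                  >>> (7 - (PySem.Int.mod j 8).toNat)) &&& 1 = 1
            then '1' else '0'
          else '0') := by
      intro k hk
      have hb := block_eq s.toList hcodes bs hpos (0 + bs * k) (by positivity) (by
        have := hKbound k hk; omega)
      rw [hb]
      apply List.map_congr_left
      intro j _
      rw [hN0.2]
    have hfull : ∀ k : Nat, k + 1 < K →
        (PySem.List.slice (pvBin s.toList) (some (0 + bs * (k : Int))) (some (0 + bs * k + bs))).length = bs.toNat := by
      intro k hk
      have h1 : bs * ((k : Int) + 1) < N := by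
        have := hKbound (k + 1) hk
        push_cast at this ⊢
        omega
      have hk0 : (0:Int) ≤ bs * k := by positivity
      rw [PySem.List.slice_toNat _ (by omega) (by omega)]
      simp only [List.length_take, List.length_drop]
      rw [pvBin_length s.toList hcodes]
      have h2 : (bs * ((k:Int)) + bs).toNat = (bs * k).toNat + bs.toNat := by omega
      have h3 : bs * (k:Int) + bs < 8 * (s.toList.length : Int) := by
        rw [← hN0.2]; nlinarith [h1]
      omega
    have hfix := fixlast_map K
      (fun k : Nat => PySem.List.slice (pvBin s.toList) (some (0 + bs * k)) (some (0 + bs * k + bs)))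
      bs hpos hfull
    rw [hfix, List.map_map]
    simp only [Function.comp_def]
    apply List.map_congr_left
    intro k hk
    exact congrArg _ (hcore k (by simpa using hk))

-- ===== VERDICT (by name: the statement is the Claim_ definition above) =====
theorem string_to_blocks_spec : Claim_equal_string_to_blocks := by
  intro s bs hDom hPre
  unfold Spec_string_to_blocks
  unfold Pre_string_to_blocks at hPre
  exact main_eq s bs hDom hPre
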